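-- pv_equiv track=rewrite | github.com/Ayushman125/Adaptive-Neuro-Symbolic-Concept-Learning-under-Noisy-Perception | evaluation/run_benchmarks.py | _convergence_step
-- ===== SOURCE A (Python) =====
-- def _convergence_step(top_theories, window=3):
--     if len(top_theories) < window:
--         return None
--     for i in range(0, len(top_theories) - window + 1):
--         segment = top_theories[i:i + window]
--         head = segment[0]
--         if head and all(t == head for t in segment):
--             return i + window
--     return None
-- ===== SOURCE B (Python) =====
-- def _convergence_step(top_theories, window=3):
--     if len(top_theories) < window:
--         return None
--     run = 0
--     prev = None
--     for i, t in enumerate(top_theories):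
--         run = run + 1 if prev is not None and t == prev else 1
--         if run >= window and t:
--             return i + 1
--         prev = t
--     return None
-- ===== Notes on version B (the rewrite author's own statement) =====
-- stated objective: faster
-- what changed: Replaced the per-start-index window re-slicing with all() checks by a single linear pass maintaining a run-length counter of consecutive identical elements, returning i+1 as soon as the run reaches window on a truthy element.
-- outside the precondition, e.g. on _convergence_step(['a', 'a', 'a', 'x', 'y'], -2): A returns -2, B returns 1; on _convergence_step([], 0): A raises IndexError, B returns None
import Mathlib
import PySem

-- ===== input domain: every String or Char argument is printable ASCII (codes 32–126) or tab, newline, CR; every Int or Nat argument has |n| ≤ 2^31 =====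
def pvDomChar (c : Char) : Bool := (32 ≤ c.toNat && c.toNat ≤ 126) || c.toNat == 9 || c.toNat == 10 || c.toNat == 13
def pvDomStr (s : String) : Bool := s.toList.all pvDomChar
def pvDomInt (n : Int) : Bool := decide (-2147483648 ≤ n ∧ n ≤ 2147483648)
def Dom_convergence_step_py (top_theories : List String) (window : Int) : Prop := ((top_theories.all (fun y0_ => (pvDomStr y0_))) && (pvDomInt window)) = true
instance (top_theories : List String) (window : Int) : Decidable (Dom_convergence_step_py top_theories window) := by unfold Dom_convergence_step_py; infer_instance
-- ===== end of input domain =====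

-- B replaces A's window re-slicing with a single pass keeping a run-length counter; return values only, no mutation.

-- ===== PORT A =====
def convergence_step_py (top_theories : List String) (window : Int) : Option Int :=
  if (top_theories.length : Int) < window then none
  else
    (PySem.List.pyRange 0 ((top_theories.length : Int) - window + 1) 1).findSome? (fun i =>
      let segment := PySem.List.slice top_theories (some i) (some (i + window))
      match PySem.List.pyGet? segment 0 with
      | none => none  -- Python raises IndexError here (empty segment); excluded by Pre_
      | some head =>
        if head != "" && segment.all (fun t => t == head) then some (i + window) else none)

-- ===== PORT B =====
def convergence_step_py_altGo (window : Int) : List String → Int → Int → Option String → Option Int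
  | [], _, _, _ => none
  | t :: rest, i, run, prev =>
    let run' : Int := if prev == some t then run + 1 else 1
    if window ≤ run' ∧ t ≠ "" then some (i + 1)
    else convergence_step_py_altGo window rest (i + 1) run' (some t)

def convergence_step_py_alt (top_theories : List String) (window : Int) : Option Int :=
  if (top_theories.length : Int) < window then none
  else convergence_step_py_altGo window top_theories 0 0 none

-- ===== PRECONDITION & SPEC =====
-- Pre_ restricts to the task's natural domain window ≥ 1: for window ≤ 0 the Python A either raises
-- IndexError (segment[0] on an empty slice, e.g. window = 0) or returns accidental values produced by
-- Python's negative-slice semantics (e.g. -2 on (["a","a","a","x","y"], -2)).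
def Pre_convergence_step_py (top_theories : List String) (window : Int) : Prop := 1 ≤ window
instance (top_theories : List String) (window : Int) : Decidable (Pre_convergence_step_py top_theories window) := by unfold Pre_convergence_step_py; infer_instance

def pvWitness_convergence_step_py : List String × Int := (["a", "a", "a"], 3)

def Spec_convergence_step_py (top_theories : List String) (window : Int) (out : Option Int) : Prop := out = convergence_step_py_alt top_theories window
instance (top_theories : List String) (window : Int) (out : Option Int) : Decidable (Spec_convergence_step_py top_theories window out) := by unfold Spec_convergence_step_py; infer_instance

-- ===== CLAIM (what is proved, stated in full; the proofs are below) =====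
def Claim_equal_convergence_step_py : Prop := ∀ (top_theories : List String) (window : Int), Dom_convergence_step_py top_theories window → Pre_convergence_step_py top_theories window → Spec_convergence_step_py top_theories window (convergence_step_py top_theories window)

-- ===== LEMMAS AND PROOFS =====

-- Reference recursion for A: first all-equal truthy window, returning (start index + w).
def aRec (w : Nat) : List String → Option Nat
  | [] => none
  | t :: rest =>
    if w ≤ (t :: rest).length then
      (if t != "" && ((t :: rest).take w).all (fun s => s == t) then some w
       else (aRec w rest).map (· + 1))
    else none

-- Relative-offset version of B's counter loop.
def bPure (w : Nat) : List String → Nat → Option String → Option Nat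
  | [], _, _ => none
  | t :: rest, run, prev =>
    let run' : Nat := if prev == some t then run + 1 else 1
    if w ≤ run' ∧ t ≠ "" then some 1
    else (bPure w rest run' (some t)).map (· + 1)

theorem findSome?_map_comm {α β γ : Type} (h : γ → β) (l : List α) (F : α → Option β) (G : α → Option γ)
    (hfg : ∀ a ∈ l, F a = (G a).map h) : l.findSome? F = (l.findSome? G).map h := by
  induction l with
  | nil => simp
  | cons a l ih =>
    simp only [List.findSome?]
    rw [hfg a (by simp)]
    cases hG : G a with
    | none => simpa using ih (fun b hb => hfg b (by simp [hb]))
    | some v => simp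

theorem aRec_cons (w : Nat) (t : String) (rest : List String) :
    aRec w (t :: rest) = if w ≤ (t :: rest).length then
      (if t != "" && ((t :: rest).take w).all (fun s => s == t) then some w
       else (aRec w rest).map (· + 1)) else none := rfl

theorem aRec_none_of_short (w : Nat) (xs : List String) (h : xs.length < w) : aRec w xs = none := by
  cases xs with
  | nil => simp [aRec]
  | cons t rest => simp only [aRec]; rw [if_neg (Nat.not_le.mpr h)]

-- Nat-indexed version of A's scan over start indices.
def aScanF (w : Nat) (tops : List String) (i : Nat) : Option Nat :=
  let seg := (tops.drop i).take w
  match seg.head? with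
  | none => none
  | some head => if head != "" && seg.all (fun s => s == head) then some (i + w) else none

def aScan (w : Nat) (tops : List String) : Option Nat :=
  (List.range (tops.length - w + 1)).findSome? (aScanF w tops)

theorem portA_eq_aScan (w : Nat) (tops : List String) (hlen : w ≤ tops.length) :
    convergence_step_py tops (w : Int) = (aScan w tops).map (fun n : Nat => (n : Int)) := by
  unfold convergence_step_py aScan
  rw [if_neg (by push_cast; omega)]
  rw [PySem.List.pyRange_one]
  have hto : (((tops.length : Int) - (w : Int) + 1) - 0).toNat = tops.length - w + 1 := by omega
  rw [hto, List.findSome?_map]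
  refine findSome?_map_comm (fun n : Nat => (n : Int)) _ _ _ (fun k _ => ?_)
  simp only [Function.comp, zero_add]
  rw [PySem.List.slice_natCast_add, PySem.List.pyGet?_zero, ← List.head?_eq_getElem?]
  unfold aScanF
  cases hh : ((tops.drop k).take w).head? with
  | none => simp [hh]
  | some head =>
    simp only [hh]
    by_cases hc : (head != "" && ((tops.drop k).take w).all (fun s => s == head)) = true
    · rw [if_pos hc, if_pos hc]
      simp
    · rw [if_neg hc, if_neg hc]
      simp

theorem aScan_eq_aRec (w : Nat) (hw : 1 ≤ w) : ∀ (tops : List String), w ≤ tops.length →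
    aScan w tops = aRec w tops := by
  intro tops
  induction tops with
  | nil => intro h; simp at h; omega
  | cons t rest ih =>
    intro hlen
    have hm : (t :: rest).length - w + 1 = (rest.length + 1 - w) + 1 := by simp only [List.length_cons]
    unfold aScan
    rw [hm, List.range_succ_eq_map, List.findSome?_cons]
    have hht : (List.take w (t :: rest)).head? = some t := by
      obtain ⟨n, rfl⟩ : ∃ n, w = n + 1 := ⟨w - 1, by omega⟩
      simp [List.take_succ_cons]
    have hF0 : aScanF w (t :: rest) 0
        = if (t != "" && ((t :: rest).take w).all (fun s => s == t)) = true then some w else none := by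
      unfold aScanF
      simp only [List.drop_zero, hht, Nat.zero_add]
    rw [aRec_cons, if_pos hlen, hF0]
    by_cases hc : (t != "" && ((t :: rest).take w).all (fun s => s == t)) = true
    · rw [if_pos hc, if_pos hc]
    · rw [if_neg hc, if_neg hc]
      simp only
      rw [List.findSome?_map]
      have hpt : ∀ k ∈ List.range (rest.length + 1 - w),
          (aScanF w (t :: rest) ∘ Nat.succ) k = (aScanF w rest k).map (· + 1) := by
        intro k _
        simp only [Function.comp]
        unfold aScanF
        simp only [List.drop_succ_cons]
        cases hh : ((rest.drop k).take w).head? with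
        | none => simp [hh]
        | some head =>
          simp only [hh]
          by_cases hcc : (head != "" && ((rest.drop k).take w).all (fun s => s == head)) = true
          · rw [if_pos hcc, if_pos hcc]
            simp
            omega
          · rw [if_neg hcc, if_neg hcc]
            simp
      rw [findSome?_map_comm (· + 1) _ _ _ hpt]
      by_cases hwr : w ≤ rest.length
      · have : rest.length + 1 - w = rest.length - w + 1 := by omega
        rw [this]
        rw [← aScan, ih hwr]
      · have h0 : rest.length + 1 - w = 0 := by omega
        rw [h0]
        simp [aRec_none_of_short w rest (by omega)]

-- A's port equals aRec (under the guard w ≤ len, w ≥ 1).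
theorem portA_eq_aRec (w : Nat) (tops : List String) (hw : 1 ≤ w) (hlen : w ≤ tops.length) :
    convergence_step_py tops (w : Int) = (aRec w tops).map (fun n : Nat => (n : Int)) := by
  rw [portA_eq_aScan w tops hlen, aScan_eq_aRec w hw tops hlen]

-- B's loop equals bPure with the absolute index added.
theorem altGo_eq_bPure (w : Nat) (xs : List String) : ∀ (iN rN : Nat) (prev : Option String),
    convergence_step_py_altGo (w : Int) xs (iN : Int) (rN : Int) prev
      = (bPure w xs rN prev).map (fun k => (iN : Int) + (k : Int)) := by
  induction xs with
  | nil => intro iN rN prev; simp [convergence_step_py_altGo, bPure]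
  | cons t rest ih =>
    intro iN rN prev
    simp only [convergence_step_py_altGo, bPure]
    by_cases hp : prev == some t
    · simp only [hp, if_pos]
      by_cases hc : w ≤ rN + 1 ∧ t ≠ ""
      · rw [if_pos (⟨by exact_mod_cast Int.ofNat_le.mpr hc.1, hc.2⟩ : (w:Int) ≤ (rN:Int)+1 ∧ t ≠ ""), if_pos hc]
        simp
      · rw [if_neg (by intro h; exact hc ⟨by exact_mod_cast h.1, h.2⟩), if_neg hc]
        have : ((rN : Int) + 1) = ((rN + 1 : Nat) : Int) := by push_cast; ring
        rw [this]
        have : ((iN : Int) + 1) = ((iN + 1 : Nat) : Int) := by push_cast; ring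
        rw [this, ih (iN + 1) (rN + 1) (some t)]
        cases bPure w rest (rN + 1) (some t) <;> simp <;> push_cast <;> ring
    · simp only [Bool.not_eq_true] at hp
      simp only [hp, Bool.false_eq_true, reduceIte]
      by_cases hc : w ≤ 1 ∧ t ≠ ""
      · rw [if_pos (by exact ⟨by exact_mod_cast Int.ofNat_le.mpr hc.1, hc.2⟩), if_pos hc]
        simp
      · rw [if_neg (by intro h; exact hc ⟨by exact_mod_cast h.1, h.2⟩), if_neg hc]
        have h1 : (1 : Int) = ((1 : Nat) : Int) := by norm_num
        have : ((iN : Int) + 1) = ((iN + 1 : Nat) : Int) := by push_cast; ring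
        rw [this, h1, ih (iN + 1) 1 (some t)]
        cases bPure w rest 1 (some t) <;> simp <;> push_cast <;> ring

-- Windows fully inside or crossing out of a maximal constant block never fire.
theorem aRec_replicate_skip (w : Nat) (hw : 1 ≤ w) :
    ∀ (r : Nat) (v t : String) (zs : List String), (v ≠ "" → r < w) → v ≠ t →
      aRec w (List.replicate r v ++ t :: zs) = (aRec w (t :: zs)).map (· + r) := by
  intro r
  induction r with
  | zero => intro v t zs _ _; simp
  | succ r ih =>
    intro v t zs hv hvt
    rw [List.replicate_succ, List.cons_append]
    by_cases hlen : w ≤ (v :: (List.replicate r v ++ t :: zs)).length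
    · rw [aRec_cons, if_pos hlen]
      have hcond : (v != "" && ((v :: (List.replicate r v ++ t :: zs)).take w).all (fun s => s == v)) = false := by
        by_cases hve : v = ""
        · simp [hve]
        · have hr : r + 1 < w := hv hve
          have htake : (v :: (List.replicate r v ++ t :: zs)).take w
              = (v :: List.replicate r v) ++ (t :: zs).take (w - (r + 1)) := by
            have : v :: (List.replicate r v ++ t :: zs) = (v :: List.replicate r v) ++ (t :: zs) := by simp
            rw [this, List.take_append, List.take_of_length_le (by simp; omega)]
            simp
          have hmem : t ∈ (v :: (List.replicate r v ++ t :: zs)).take w := by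
            rw [htake]
            have : t ∈ (t :: zs).take (w - (r + 1)) := by
              rw [List.take_cons (by omega)]
              exact List.mem_cons_self
            simp [this]
          simp only [Bool.and_eq_false_iff]
          right
          exact List.all_eq_false.mpr ⟨t, hmem, by simp; exact fun h => hvt h.symm⟩
      rw [hcond]
      simp only [Bool.false_eq_true, reduceIte]
      rw [ih v t zs (fun h => by have := hv h; omega) hvt]
      cases aRec w (t :: zs) <;> simp <;> omega
    · simp only [List.length_cons, List.length_append, List.length_replicate] at hlen
      have h1 : (v :: (List.replicate r v ++ t :: zs)).length < w := by simp; omega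
      have h2 : (t :: zs).length < w := by simp; omega
      rw [aRec_none_of_short w _ h1, aRec_none_of_short w _ h2]
      simp

theorem aRec_replicate_fire (w : Nat) (hw : 1 ≤ w) (t : String) (ht : t ≠ "") (rest : List String) :
    aRec w (List.replicate w t ++ rest) = some w := by
  obtain ⟨n, rfl⟩ : ∃ n, w = n + 1 := ⟨w - 1, by omega⟩
  simp only [List.replicate_succ, List.cons_append, aRec]
  rw [if_pos (by simp)]
  rw [if_pos]
  simp only [List.take_succ_cons, List.take_append, List.take_replicate, Nat.sub_self,
    List.take_zero, List.append_nil, Nat.min_self, List.all_cons, List.all_eq_true]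
  simp [ht, List.mem_replicate]

-- Core invariant: B's counter state (run, prev) stands for a virtual constant prefix.
theorem aRec_replicate_none (w : Nat) (v : String) : ∀ (r : Nat), (v ≠ "" → r < w) →
    aRec w (List.replicate r v) = none := by
  intro r
  induction r with
  | zero => intro _; simp [aRec]
  | succ r ih =>
    intro hv
    rw [List.replicate_succ, aRec_cons]
    by_cases hlen : w ≤ (v :: List.replicate r v).length
    · rw [if_pos hlen]
      have hv' : v = "" := by
        by_contra h
        have := hv h
        simp at hlen
        omega
      have hc : (v != "" && ((v :: List.replicate r v).take w).all (fun s => s == v)) = false := by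
        simp [hv']
      rw [hc]
      simp only [Bool.false_eq_true, reduceIte]
      rw [ih (fun h => absurd hv' h)]
      simp
    · rw [if_neg hlen]

theorem replicate_shift (r : Nat) (t : String) (rest : List String) :
    List.replicate r t ++ t :: rest = List.replicate (r + 1) t ++ rest := by
  rw [List.replicate_succ', List.append_assoc, List.singleton_append]

theorem core (w : Nat) (hw : 1 ≤ w) (xs : List String) : ∀ (r : Nat) (prev : Option String),
    (∀ v, prev = some v → v ≠ "" → r < w) → (prev = none → r = 0) →
    (bPure w xs r prev).map (· + r) = aRec w ((prev.elim [] (fun v => List.replicate r v)) ++ xs) := by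
  induction xs with
  | nil =>
    intro r prev h1 h2
    cases prev with
    | none => simp [bPure, h2 rfl, aRec]
    | some v =>
      simp only [bPure, Option.map_none, Option.elim, List.append_nil]
      exact (aRec_replicate_none w v r (h1 v rfl)).symm
  | cons t rest ih =>
    intro r prev h1 h2
    simp only [bPure]
    by_cases hp : prev == some t
    · have hpe : prev = some t := by simpa using hp
      subst hpe
      simp only [Option.elim]
      simp only [hp, if_true]
      rw [replicate_shift]
      by_cases hc : w ≤ r + 1 ∧ t ≠ ""
      · have hrw : w = r + 1 := by have := h1 t rfl hc.2; omega
        rw [if_pos hc, ← hrw, aRec_replicate_fire w hw t hc.2 rest]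
        simp
        omega
      · rw [if_neg hc]
        have inv' : ∀ v, (some t : Option String) = some v → v ≠ "" → r + 1 < w := by
          intro v hv hne
          cases hv
          by_contra hlt
          exact hc ⟨by omega, hne⟩
        have hIH := ih (r + 1) (some t) inv' (by simp)
        simp only [Option.elim] at hIH
        rw [← hIH, Option.map_map]
        cases bPure w rest (r + 1) (some t) <;> simp <;> omega
    · have hpb : (prev == some t) = false := by simpa using hp
      simp only [hpb, Bool.false_eq_true, if_false]
      have hstep : ∀ (hcond : ¬ (w ≤ 1 ∧ t ≠ "")),
          (bPure w rest 1 (some t)).map (· + 1) = aRec w (t :: rest) := by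
        intro hcond
        have inv' : ∀ v, (some t : Option String) = some v → v ≠ "" → 1 < w := by
          intro v hv hne
          cases hv
          by_contra hlt
          exact hcond ⟨by omega, hne⟩
        have hIH := ih 1 (some t) inv' (by simp)
        simpa using hIH
      have hR : aRec w ((prev.elim [] (fun v => List.replicate r v)) ++ t :: rest)
          = (aRec w (t :: rest)).map (· + r) := by
        cases prev with
        | none =>
          have : r = 0 := h2 rfl
          subst this
          simp [Option.elim]
        | some v =>
          have hvt : v ≠ t := by
            intro h
            subst h
            simp at hpb
          simp only [Option.elim]
          exact aRec_replicate_skip w hw r v t rest (h1 v rfl) hvt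
      rw [hR]
      by_cases hc : w ≤ 1 ∧ t ≠ ""
      · rw [if_pos hc]
        have hw1 : w = 1 := by omega
        have hfire : aRec w (t :: rest) = some 1 := by
          rw [aRec_cons, if_pos (by simp; omega)]
          rw [if_pos]
          · exact congrArg some hw1
          · subst hw1
            simp [hc.2, List.take_one]
        rw [hfire]
      · rw [if_neg hc, ← hstep hc, Option.map_map]

-- ===== VERDICT (by name: the statement is the Claim_ definition above) =====
theorem convergence_step_py_spec : Claim_equal_convergence_step_py := by
  intro tops window _ hpre
  unfold Pre_convergence_step_py at hpre
  unfold Spec_convergence_step_py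
  by_cases hlt : (tops.length : Int) < window
  · unfold convergence_step_py convergence_step_py_alt
    rw [if_pos hlt, if_pos hlt]
  · obtain ⟨w, rfl⟩ : ∃ w : Nat, window = (w : Int) :=
      ⟨window.toNat, (Int.toNat_of_nonneg (by omega)).symm⟩
    have hw1 : 1 ≤ w := by exact_mod_cast hpre
    have hwl : w ≤ tops.length := by
      have := not_lt.mp hlt
      exact_mod_cast this
    rw [portA_eq_aRec w tops hw1 hwl]
    unfold convergence_step_py_alt
    rw [if_neg hlt]
    have hB := altGo_eq_bPure w tops 0 0 none
    simp only [Nat.cast_zero] at hB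
    rw [hB]
    have hcore := core w hw1 tops 0 none (by intro v h; cases h) (fun _ => rfl)
    simp only [Option.elim, List.nil_append] at hcore
    rw [← hcore]
    cases bPure w tops 0 none <;> simp
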